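-- pv_equiv track=rewrite | github.com/MorenaSandroni/Tps-TDA-2024 | tp3/tp3.py | distribuir_maestros_equilibrio
-- ===== SOURCE A (Python) =====
-- import heapq
--
-- def suma_cuadrados(sumas_grupos):
--     return sum(suma ** 2 for suma in sumas_grupos)
--
-- def distribuir_maestros_equilibrio(maestros, k):
--     maestros_ordenados = sorted(maestros, key=lambda x: x[1], reverse=True)
--     grupos = [[] for _ in range(k)]
--     sumas_grupos = [0] * k
--     heap = [(0, i) for i in range(k)]  # (suma, índice del grupo)
--     heapq.heapify(heap)
--
--     # Asigna de manera alternada para equilibrar la carga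
--     for nombre, habilidad in maestros_ordenados:
--         suma_actual, indice_grupo = heapq.heappop(heap)
--         grupos[indice_grupo].append(nombre)
--         suma_actual += habilidad
--         sumas_grupos[indice_grupo] = suma_actual
--         heapq.heappush(heap, (suma_actual, indice_grupo))
--
--     return suma_cuadrados(sumas_grupos), grupos
-- ===== SOURCE B (Python) =====
-- def distribuir_maestros_equilibrio(maestros, k):
--     orden = sorted(maestros, key=lambda x: x[1], reverse=True)
--     grupos = [[] for _ in range(k)]
--     sumas = [0] * k
--     for nombre, habilidad in orden:
--         i = sumas.index(min(sumas))
--         grupos[i].append(nombre)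
--         sumas[i] += habilidad
--     return sum(s * s for s in sumas), grupos
-- ===== Notes on version B (the rewrite author's own statement) =====
-- stated objective: simpler
-- what changed: Replaces A's heapq priority queue of (sum, index) pairs by a plain per-maestro argmin over the list of group sums (min + index, first occurrence matching heapq's lexicographic tie-break), dropping the heap entirely.
import Mathlib
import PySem

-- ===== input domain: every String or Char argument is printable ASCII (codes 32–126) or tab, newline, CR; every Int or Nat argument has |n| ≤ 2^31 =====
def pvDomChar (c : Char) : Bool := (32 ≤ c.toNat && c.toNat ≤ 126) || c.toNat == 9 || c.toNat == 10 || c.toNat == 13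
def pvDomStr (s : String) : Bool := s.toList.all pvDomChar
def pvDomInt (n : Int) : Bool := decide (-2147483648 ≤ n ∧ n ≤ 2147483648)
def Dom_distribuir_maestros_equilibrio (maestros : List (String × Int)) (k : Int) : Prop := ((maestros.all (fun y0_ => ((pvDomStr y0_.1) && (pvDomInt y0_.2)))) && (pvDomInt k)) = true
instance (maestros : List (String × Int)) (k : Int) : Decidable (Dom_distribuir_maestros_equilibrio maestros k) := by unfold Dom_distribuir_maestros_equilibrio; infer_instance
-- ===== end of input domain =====

-- ===== PORT A =====
-- B replaces A's heapq priority queue by a direct argmin over the group sums: simpler (an O(k) scan per maestro instead of a heap; not faster).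
-- suma_cuadrados(sumas_grupos)
def pvSumaCuadrados (sumas : List Int) : Int :=
  (sumas.map (fun s => s ^ 2)).sum

-- Python tuple '<' on (int, int): lexicographic.
def pvLexLt (a b : Int × Int) : Bool := a.1 < b.1 || (a.1 == b.1 && a.2 < b.2)

-- heapq is a standard-library call in A; it is ported by its specification: the heap is the list of
-- (suma, indice) pairs, heappop returns and removes the lexicographically smallest pair (exact: all
-- pairs are distinct here since indices are distinct), heappush appends; heapify is the identity.
def pvHeapMin (x : Int × Int) (xs : List (Int × Int)) : Int × Int :=
  xs.foldl (fun m y => if pvLexLt y m then y else m) x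

-- the 'for nombre, habilidad in maestros_ordenados' loop of A; none = heappop raised IndexError
def pvLoopA : List (String × Int) → List (List String) → List Int → List (Int × Int) →
    Option (List (List String) × List Int)
  | [], grupos, sumas, _ => some (grupos, sumas)
  | (nombre, hab) :: rest, grupos, sumas, heap =>
    match heap with
    | [] => none            -- heappop on an empty heap: IndexError (k ≤ 0, excluded by Pre_)
    | h :: t =>
      match PySem.List.remove? (h :: t) (pvHeapMin h t) with
      | none => none        -- unreachable: the minimum is a member
      | some heap' =>
        -- grupos[indice_grupo].append(nombre); sumas_grupos[indice_grupo] = suma_actual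
        -- (the index, drawn from range(k), is always a valid non-negative index)
        pvLoopA rest (grupos.modify (pvHeapMin h t).2.toNat (fun g => g ++ [nombre]))
          (sumas.set (pvHeapMin h t).2.toNat ((pvHeapMin h t).1 + hab))
          (heap' ++ [((pvHeapMin h t).1 + hab, (pvHeapMin h t).2)])

def distribuir_maestros_equilibrio (maestros : List (String × Int)) (k : Int) : Int × List (List String) :=
  match pvLoopA (PySem.List.sorted maestros (fun x => x.2) true)              -- maestros_ordenados
      ((PySem.List.pyRange 0 k 1).map (fun _ => ([] : List String)))          -- [[] for _ in range(k)]
      (List.replicate k.toNat (0 : Int))                                      -- [0] * k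
      ((PySem.List.pyRange 0 k 1).map (fun i => ((0 : Int), i))) with         -- [(0, i) for i in range(k)]
  | some (grupos', sumas') => (pvSumaCuadrados sumas', grupos')
  | none => (0, [])         -- unreachable under Pre_

-- ===== PORT B =====
-- the 'for nombre, habilidad in orden' loop of B; none = min([]) raised ValueError
def pvLoopB : List (String × Int) → List (List String) → List Int →
    Option (List (List String) × List Int)
  | [], grupos, sumas => some (grupos, sumas)
  | (nombre, hab) :: rest, grupos, sumas =>
    match PySem.List.min? sumas (fun x => x) with
    | none => none          -- min of an empty list: ValueError (k ≤ 0, excluded by Pre_)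
    | some m =>
      match PySem.List.index? sumas m with
      | none => none        -- unreachable: the minimum is a member
      | some i =>
        pvLoopB rest (grupos.modify i (fun g => g ++ [nombre])) (sumas.set i (m + hab))

def distribuir_maestros_equilibrio_alt (maestros : List (String × Int)) (k : Int) : Int × List (List String) :=
  match pvLoopB (PySem.List.sorted maestros (fun x => x.2) true)              -- orden
      ((PySem.List.pyRange 0 k 1).map (fun _ => ([] : List String)))          -- [[] for _ in range(k)]
      (List.replicate k.toNat (0 : Int)) with                                 -- [0] * k
  | some (grupos, sumas) => ((sumas.map (fun s => s * s)).sum, grupos)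
  | none => (0, [])

-- ===== PRECONDITION & SPEC =====
-- A raises (heappop from the empty heap: IndexError) exactly when k <= 0 and maestros is nonempty;
-- Pre_ excludes only those inputs.
def Pre_distribuir_maestros_equilibrio (maestros : List (String × Int)) (k : Int) : Prop :=
  maestros = [] ∨ 1 ≤ k
instance (maestros : List (String × Int)) (k : Int) : Decidable (Pre_distribuir_maestros_equilibrio maestros k) := by unfold Pre_distribuir_maestros_equilibrio; infer_instance

def pvWitness_distribuir_maestros_equilibrio : (List (String × Int)) × Int := ([("ana", 3), ("bob", 1)], 2)

def Spec_distribuir_maestros_equilibrio (maestros : List (String × Int)) (k : Int) (out : Int × List (List String)) : Prop := out = distribuir_maestros_equilibrio_alt maestros k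
instance (maestros : List (String × Int)) (k : Int) (out : Int × List (List String)) : Decidable (Spec_distribuir_maestros_equilibrio maestros k out) := by unfold Spec_distribuir_maestros_equilibrio; infer_instance

-- ===== CLAIM (what is proved, stated in full; the proofs are below) =====
def Claim_equal_distribuir_maestros_equilibrio : Prop := ∀ (maestros : List (String × Int)) (k : Int), Dom_distribuir_maestros_equilibrio maestros k → Pre_distribuir_maestros_equilibrio maestros k → Spec_distribuir_maestros_equilibrio maestros k (distribuir_maestros_equilibrio maestros k)

-- ===== LEMMAS AND PROOFS =====

-- the multiset the heap always holds: one pair (sumas[j], j) per group index j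
def pvPairs (sumas : List Int) : List (Int × Int) :=
  (List.range sumas.length).map (fun j => (sumas.getD j 0, (j : Int)))

lemma pvLexLt_irrefl (a : Int × Int) : pvLexLt a a = false := by
  simp [pvLexLt]

lemma pvLexLt_asymm {a b : Int × Int} (h : pvLexLt a b = true) : pvLexLt b a = false := by
  simp only [pvLexLt, Bool.or_eq_true, decide_eq_true_eq, Bool.and_eq_true, beq_iff_eq,
    Bool.or_eq_false_iff, decide_eq_false_iff_not, Bool.and_eq_false_iff, beq_eq_false_iff_ne] at h ⊢
  omega

lemma pvLexLt_false_trans {a b c : Int × Int} (h1 : pvLexLt b a = false)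
    (h2 : pvLexLt c b = false) : pvLexLt c a = false := by
  simp only [pvLexLt, Bool.or_eq_false_iff, decide_eq_false_iff_not, Bool.and_eq_false_iff,
    beq_eq_false_iff_ne] at h1 h2 ⊢
  omega

-- foldl-min over the heap: it is a member and nothing in the heap is lexicographically below it
lemma pvHeapMin_spec (x : Int × Int) (xs : List (Int × Int)) :
    pvHeapMin x xs ∈ x :: xs ∧ ∀ y ∈ x :: xs, pvLexLt y (pvHeapMin x xs) = false := by
  induction xs generalizing x with
  | nil =>
    refine ⟨List.mem_cons_self, ?_⟩
    intro y hy
    have : y = x := by simpa using hy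
    subst this
    exact pvLexLt_irrefl y
  | cons z zs ih =>
    have hstep : pvHeapMin x (z :: zs) = pvHeapMin (if pvLexLt z x then z else x) zs := rfl
    obtain ⟨ihmem, ihmin⟩ := ih (if pvLexLt z x then z else x)
    constructor
    · rw [hstep]
      rcases List.mem_cons.1 ihmem with h | h
      · rw [h]
        split_ifs
        · exact List.mem_cons_of_mem _ List.mem_cons_self
        · exact List.mem_cons_self
      · exact List.mem_cons_of_mem _ (List.mem_cons_of_mem _ h)
    · intro y hy
      rw [hstep]
      have hhead := ihmin _ List.mem_cons_self
      rcases List.mem_cons.1 hy with hyx | hy2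
      · subst hyx
        split_ifs at hhead ⊢ with hzx
        · exact pvLexLt_false_trans hhead (pvLexLt_asymm hzx)
        · exact hhead
      · rcases List.mem_cons.1 hy2 with hyz | hyzs
        · subst hyz
          split_ifs at hhead ⊢ with hzx
          · exact hhead
          · exact pvLexLt_false_trans hhead (by simpa using hzx)
        · exact ihmin _ (List.mem_cons_of_mem _ hyzs)

-- the central step: on a heap permutation-equal to pvPairs sumas, A pops exactly
-- (min sumas, first index of that min), i.e. what B computes
lemma pvLoop_eq (items : List (String × Int)) (grupos : List (List String)) (sumas : List Int)
    (heap : List (Int × Int)) (hne : sumas ≠ [])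
    (hperm : heap.Perm (pvPairs sumas)) :
    pvLoopA items grupos sumas heap = pvLoopB items grupos sumas := by
  induction items generalizing grupos sumas heap with
  | nil => rfl
  | cons p rest ih =>
    obtain ⟨nombre, hab⟩ := p
    -- B's side data
    obtain ⟨m, hm⟩ : ∃ m, PySem.List.min? sumas (fun x => x) = some m := by
      cases hm' : PySem.List.min? sumas (fun x => x) with
      | none => exact absurd ((PySem.List.min?_eq_none_iff _ _).1 hm') hne
      | some m => exact ⟨m, rfl⟩
    have hmmem : m ∈ sumas := PySem.List.min?_mem hm
    have hmin : ∀ y ∈ sumas, m ≤ y := PySem.List.min?_isMin hm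
    obtain ⟨i, hi⟩ : ∃ i, PySem.List.index? sumas m = some i := by
      cases hi' : PySem.List.index? sumas m with
      | none => exact absurd hmmem ((PySem.List.index?_eq_none_iff _ _).1 hi')
      | some i => exact ⟨i, rfl⟩
    obtain ⟨hilt, hival, hifirst⟩ := PySem.List.getElem_of_index?_eq_some hi
    -- the heap is nonempty
    have hlen : heap.length = sumas.length := by
      simpa [pvPairs] using hperm.length_eq
    cases heap with
    | nil =>
      exfalso
      simp only [List.length_nil] at hlen
      exact hne (List.length_eq_zero_iff.1 hlen.symm)
    | cons h0 t =>
    obtain ⟨hmem_min, hmin_min⟩ := pvHeapMin_spec h0 t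
    -- the popped element is (m, i)
    have hmemmin : pvHeapMin h0 t ∈ pvPairs sumas := hperm.mem_iff.1 hmem_min
    obtain ⟨j, hjmem, hjval⟩ := List.mem_map.1 hmemmin
    rw [List.mem_range] at hjmem
    have hjd : sumas.getD j 0 = sumas[j] := by
      simp [List.getD_eq_getElem?_getD, List.getElem?_eq_getElem hjmem]
    have hmi_mem : ((m, (i : Int)) : Int × Int) ∈ (h0 :: t) := by
      apply hperm.mem_iff.2
      have : ((m, (i : Int)) : Int × Int) = (sumas.getD i 0, (i : Int)) := by
        simp [List.getD_eq_getElem?_getD, List.getElem?_eq_getElem hilt, hival]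
      rw [this]
      exact List.mem_map.2 ⟨i, List.mem_range.2 hilt, rfl⟩
    have hnotlt := hmin_min _ hmi_mem
    have hpop : pvHeapMin h0 t = (m, (i : Int)) := by
      rw [← hjval] at *
      have h1 : m ≤ sumas.getD j 0 := by rw [hjd]; exact hmin _ (List.getElem_mem hjmem)
      simp only [pvLexLt, Bool.or_eq_false_iff, decide_eq_false_iff_not, Bool.and_eq_false_iff,
        beq_eq_false_iff_ne] at hnotlt
      have heq : sumas.getD j 0 = m := le_antisymm (by omega) h1
      have hji : ¬ j < i := fun hcon => hifirst j hcon (by rw [← hjd, heq])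
      have hij : ((j : Nat) : Int) = ((i : Nat) : Int) := by
        rcases hnotlt with ⟨h2, h3 | h3⟩
        · exact absurd heq (by omega)
        · omega
      rw [Prod.mk.injEq]
      exact ⟨heq, hij⟩
    have hrm : PySem.List.remove? (h0 :: t) ((m, (i : Int)) : Int × Int) =
        some ((h0 :: t).erase (m, (i : Int))) :=
      PySem.List.remove?_eq_some_erase _ _ hmi_mem
    -- one step of each loop
    rw [pvLoopA, pvLoopB]
    simp only [hpop, hrm, hm, hi, Int.toNat_natCast]
    -- the permutation invariant after the step
    have hperm' : ((h0 :: t).erase (m, (i : Int)) ++ [(m + hab, (i : Int))]).Perm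
        (pvPairs (sumas.set i (m + hab))) := by
      have hsplit : pvPairs sumas =
          ((List.range i).map (fun j => (sumas.getD j 0, (j : Int)))) ++
          ((m, (i : Int)) :: ((List.range (sumas.length - (i+1))).map
            (fun j => (sumas.getD (i+1+j) 0, ((i+1+j : Nat) : Int))))) := by
        have hL : sumas.length = i + 1 + (sumas.length - (i+1)) := by omega
        rw [pvPairs, hL, List.range_add, List.range_succ]
        simp [List.map_append, List.map_map, Function.comp_def,
          List.getD_eq_getElem?_getD, List.getElem?_eq_getElem hilt, hival]
      have hnotin : ((m, (i : Int)) : Int × Int) ∉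
          (List.range i).map (fun j => (sumas.getD j 0, (j : Int))) := by
        simp only [List.mem_map, List.mem_range, not_exists, not_and]
        intro j hji hcontra
        have : ((j : Nat) : Int) = ((i : Nat) : Int) := congrArg Prod.snd hcontra
        omega
      have hsplit' : pvPairs (sumas.set i (m + hab)) =
          ((List.range i).map (fun j => (sumas.getD j 0, (j : Int)))) ++
          ((m + hab, (i : Int)) :: ((List.range (sumas.length - (i+1))).map
            (fun j => (sumas.getD (i+1+j) 0, ((i+1+j : Nat) : Int))))) := by
        have hL : (sumas.set i (m + hab)).length = i + 1 + (sumas.length - (i+1)) := by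
          simp only [List.length_set]; omega
        rw [pvPairs, hL, List.range_add, List.range_succ]
        simp only [List.map_append, List.map_map, Function.comp_def, List.map_cons, List.map_nil]
        rw [List.append_assoc, List.singleton_append]
        congr 1
        · apply List.map_congr_left
          intro j hj
          simp only [List.mem_range] at hj
          simp [List.getD_eq_getElem?_getD, List.getElem?_set_ne (by omega : i ≠ j)]
        · congr 1
          · simp [List.getD_eq_getElem?_getD, List.getElem?_set_self hilt]
          · apply List.map_congr_left
            intro j hj
            simp [List.getD_eq_getElem?_getD, List.getElem?_set_ne (by omega : i ≠ i + 1 + j)]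
      have herase : (pvPairs sumas).erase (m, (i : Int)) =
          ((List.range i).map (fun j => (sumas.getD j 0, (j : Int)))) ++
          ((List.range (sumas.length - (i+1))).map
            (fun j => (sumas.getD (i+1+j) 0, ((i+1+j : Nat) : Int)))) := by
        rw [hsplit, List.erase_append_right _ hnotin, List.erase_cons_head]
      have step1 : ((h0 :: t).erase (m, (i : Int)) ++ [(m + hab, (i : Int))]).Perm
          ((pvPairs sumas).erase (m, (i : Int)) ++ [(m + hab, (i : Int))]) :=
        (hperm.erase _).append_right _
      rw [herase] at step1
      refine step1.trans ?_
      rw [hsplit', List.append_assoc]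
      exact (List.perm_append_left_iff _).2 List.perm_append_comm
    have hne' : sumas.set i (m + hab) ≠ [] := by
      intro hcon
      have := congrArg List.length hcon
      simp only [List.length_set, List.length_nil] at this
      omega
    exact ih _ (sumas.set i (m + hab)) _ hne' hperm'

lemma pvSumaCuadrados_eq (l : List Int) : pvSumaCuadrados l = (l.map (fun s => s * s)).sum := by
  simp [pvSumaCuadrados, pow_two]

-- ===== VERDICT (by name: the statement is the Claim_ definition above) =====
theorem distribuir_maestros_equilibrio_spec : Claim_equal_distribuir_maestros_equilibrio := by
  intro maestros k _ hpre
  unfold Spec_distribuir_maestros_equilibrio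
  unfold distribuir_maestros_equilibrio distribuir_maestros_equilibrio_alt
  rcases hpre with hnil | hk
  · subst hnil
    have hs : PySem.List.sorted ([] : List (String × Int)) (fun x => x.2) true = [] :=
      (PySem.List.sorted_eq_nil_iff _ _ _).2 rfl
    rw [hs]
    simp [pvLoopA, pvLoopB, pvSumaCuadrados_eq]
  · have hloop := pvLoop_eq (PySem.List.sorted maestros (fun x => x.2) true)
      ((PySem.List.pyRange 0 k 1).map (fun _ => ([] : List String)))
      (List.replicate k.toNat (0 : Int))
      ((PySem.List.pyRange 0 k 1).map (fun i => ((0 : Int), i)))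
      (by
        intro hcon
        have := congrArg List.length hcon
        simp only [List.length_replicate, List.length_nil] at this
        omega)
      (by
        apply List.Perm.of_eq
        rw [pvPairs, PySem.List.pyRange_one]
        simp only [sub_zero, List.map_map, Function.comp_def, zero_add, List.length_replicate]
        apply List.map_congr_left
        intro j hj
        simp only [List.mem_range] at hj
        simp [List.getD_eq_getElem?_getD, hj])
    rw [hloop]
    cases hres : pvLoopB (PySem.List.sorted maestros (fun x => x.2) true)
        ((PySem.List.pyRange 0 k 1).map (fun _ => ([] : List String)))
        (List.replicate k.toNat (0 : Int)) with
    | none => rfl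
    | some r => simp [pvSumaCuadrados_eq]
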